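-- pv_equiv track=rewrite | github.com/tnv1154/Python-Ptit | PY01027_So loc phat dep.py | check
-- ===== SOURCE A (Python) =====
-- def check(s):
--     for i in s:
--         if i != "6" and i != "8":
--             return False
--     cnt8 = 0
--     for i in s:
--         if i == "8":
--             cnt8 += 1
--         elif i == "6":
--             cnt8 = 0
--         if cnt8 == 3:
--             return False
--     return True
-- ===== SOURCE B (Python) =====
-- def check(s):
--     return all(c in "68" for c in s) and all(len(run) < 3 for run in s.split("6"))
-- ===== Notes on version B (the rewrite author's own statement) =====
-- stated objective: alternative
-- what changed: B views the string as the maximal runs of eights delimited by sixes: it splits on '6' and requires every resulting run to have length < 3, instead of A's stateful scan maintaining a consecutive-8 counter that resets on '6' and fails at 3.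
import Mathlib
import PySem

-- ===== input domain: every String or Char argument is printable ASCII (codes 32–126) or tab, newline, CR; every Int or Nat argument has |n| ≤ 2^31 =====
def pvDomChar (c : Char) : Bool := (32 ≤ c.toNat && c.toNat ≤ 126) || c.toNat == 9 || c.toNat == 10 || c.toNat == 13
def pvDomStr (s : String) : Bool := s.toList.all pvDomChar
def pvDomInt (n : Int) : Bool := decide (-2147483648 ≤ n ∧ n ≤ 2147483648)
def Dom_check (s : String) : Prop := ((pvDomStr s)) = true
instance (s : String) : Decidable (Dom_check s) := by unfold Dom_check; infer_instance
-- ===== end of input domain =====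

-- B replaces A's stateful consecutive-8 counter by a run-based view: split the string
-- on '6' into the maximal runs of eights and require each run's length < 3 (alternative; same value).

-- ===== PORT A =====
-- first loop of A: early-return False on a character that is neither '6' nor '8'
def checkLoop1 : List Char → Bool
  | [] => true
  | c :: t => if c ≠ '6' && c ≠ '8' then false else checkLoop1 t

-- second loop of A: running count of consecutive '8's, fail when it reaches 3
def checkLoop2 : List Char → Int → Bool
  | [], _ => true
  | c :: t, cnt8 =>
    let cnt8 := if c = '8' then cnt8 + 1 else if c = '6' then 0 else cnt8
    if cnt8 = 3 then false else checkLoop2 t cnt8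

def check (s : String) : Bool :=
  if checkLoop1 s.toList then checkLoop2 s.toList 0 else false

-- ===== PORT B =====
def check_alt (s : String) : Bool :=
  (s.toList.all fun c => PySem.Chars.isIn [c] "68".toList)
    && (((PySem.Str.split? s "6").getD []).all fun run => decide (PySem.Str.len run < 3))

-- ===== PRECONDITION & SPEC =====
def Spec_check (s : String) (out : Bool) : Prop := out = check_alt s
instance (s : String) (out : Bool) : Decidable (Spec_check s out) := by unfold Spec_check; infer_instance

-- ===== CLAIM (what is proved, stated in full; the proofs are below) =====
def Claim_equal_check : Prop := ∀ (s : String), Dom_check s → Spec_check s (check s)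

-- ===== LEMMAS AND PROOFS =====

-- the natural structural recursion for splitting on the single character '6'
def sp : List Char → List (List Char)
  | [] => [[]]
  | a :: t => if a = '6' then [] :: sp t else (sp t).modifyHead (a :: ·)

theorem sp_ne_nil (l : List Char) : sp l ≠ [] := by
  cases l with
  | nil => simp [sp]
  | cons a t =>
    by_cases h : a = '6'
    · simp [sp, h]
    · cases hh : sp t with
      | nil => exact absurd hh (sp_ne_nil t)
      | cons r rs => simp [sp, h, hh]

theorem toList_68 : "68".toList = ['6', '8'] := by decide

theorem isIn_single_68 (c : Char) :
    PySem.Chars.isIn [c] ['6', '8'] = (c == '6' || c == '8') := by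
  by_cases hm : c ∈ ['6', '8']
  · rw [(PySem.Chars.isIn_iff_infix _ _).2 ((List.singleton_infix_iff c _).2 hm)]
    simp only [List.mem_cons, List.not_mem_nil, or_false] at hm
    rcases hm with h | h <;> simp [h]
  · rw [(PySem.Chars.isIn_eq_false_iff _ _).2
      (fun hinf => hm ((List.singleton_infix_iff c _).1 hinf))]
    simp only [List.mem_cons, List.not_mem_nil, or_false, not_or] at hm
    simp [hm.1, hm.2]

theorem checkLoop1_eq_all (l : List Char) :
    checkLoop1 l = l.all (fun c => PySem.Chars.isIn [c] "68".toList) := by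
  induction l with
  | nil => rfl
  | cons c t ih =>
    simp only [checkLoop1, List.all_cons, ih, toList_68, isIn_single_68]
    by_cases h6 : c = '6' <;> by_cases h8 : c = '8' <;> simp [h6, h8]

-- PySem's fuel-based splitOn loop, specialised to the separator ['6'], is sp
theorem go_eq (fuel : Nat) (l cur : List Char) (acc : List (List Char))
    (h : l.length < fuel) :
    PySem.Chars.splitOn.go ['6'] fuel l cur acc
      = acc.reverse ++ (sp l).modifyHead (cur.reverse ++ ·) := by
  induction fuel generalizing l cur acc with
  | zero => omega
  | succ n ih =>
    cases l with
    | nil => simp [PySem.Chars.splitOn.go, sp]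
    | cons a rest =>
      by_cases ha : a = '6'
      · subst ha
        have hp : List.isPrefixOf ['6'] ('6' :: rest) = true := by
          simp [List.isPrefixOf]
        simp only [PySem.Chars.splitOn.go, hp, if_pos]
        rw [show List.drop (['6'] : List Char).length ('6' :: rest) = rest from rfl]
        rw [ih rest [] (cur.reverse :: acc) (by simp at h ⊢; omega)]
        cases hh : sp rest <;> simp [sp, hh, List.modifyHead]
      · have hp : List.isPrefixOf ['6'] (a :: rest) = false := by
          simp [List.isPrefixOf]
          exact fun hgoal => ha hgoal.symm
        rw [show PySem.Chars.splitOn.go ['6'] (n + 1) (a :: rest) cur acc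
            = PySem.Chars.splitOn.go ['6'] n rest (a :: cur) acc from by
          simp [PySem.Chars.splitOn.go, hp]]
        rw [ih rest (a :: cur) acc (by simp at h ⊢; omega)]
        obtain ⟨r, rs, hsp⟩ : ∃ r rs, sp rest = r :: rs := by
          cases hh : sp rest with
          | nil => exact absurd hh (sp_ne_nil rest)
          | cons r rs => exact ⟨r, rs, rfl⟩
        simp [sp, ha, hsp, List.modifyHead]

theorem splitOn_eq_sp (l : List Char) :
    PySem.Chars.splitOn l ['6'] = sp l := by
  unfold PySem.Chars.splitOn
  rw [go_eq (l.length + 1) l [] [] (by omega)]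
  obtain ⟨r, rs, hsp⟩ : ∃ r rs, sp l = r :: rs := by
    cases hh : sp l with
    | nil => exact absurd hh (sp_ne_nil l)
    | cons r rs => exact ⟨r, rs, rfl⟩
  simp [hsp]

-- A's counter loop, on valid strings, checks exactly that every '6'-delimited run is short
theorem checkLoop2_sp (l : List Char) (cnt : Int) (r : List Char) (rs : List (List Char))
    (hall : ∀ c ∈ l, c = '6' ∨ c = '8') (h0 : 0 ≤ cnt) (h2 : cnt ≤ 2)
    (hsp : sp l = r :: rs) :
    checkLoop2 l cnt
      = (decide (cnt.toNat + r.length < 3) && rs.all fun x => decide (x.length < 3)) := by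
  induction l generalizing cnt r rs with
  | nil =>
    simp only [sp, List.cons.injEq] at hsp
    obtain ⟨hr, hrs⟩ := hsp
    subst hr; subst hrs
    simp only [checkLoop2, List.all_nil, Bool.and_true, List.length_nil, Nat.add_zero]
    have : cnt.toNat < 3 := by omega
    simp [this]
  | cons c t ih =>
    obtain ⟨r', rs', hsp'⟩ : ∃ r' rs', sp t = r' :: rs' := by
      cases hh : sp t with
      | nil => exact absurd hh (sp_ne_nil t)
      | cons x y => exact ⟨x, y, rfl⟩
    rcases hall c (by simp) with hc | hc
    · subst hc
      have hsimp : sp ('6' :: t) = [] :: r' :: rs' := by simp [sp, hsp']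
      rw [hsimp] at hsp
      injection hsp with hr hrs
      subst hr; subst hrs
      have hstep : checkLoop2 ('6' :: t) cnt = checkLoop2 t 0 := by
        simp [checkLoop2]
      rw [hstep, ih 0 r' rs' (fun x hx => hall x (List.mem_cons_of_mem _ hx))
        le_rfl (by norm_num) hsp']
      simp
      intro _ _
      omega
    · subst hc
      have h8 : ('8' : Char) ≠ '6' := by decide
      have hsimp : sp ('8' :: t) = ('8' :: r') :: rs' := by
        simp [sp, hsp', List.modifyHead]
      rw [hsimp] at hsp
      injection hsp with hr hrs
      subst hr; subst hrs
      by_cases h3 : cnt + 1 = 3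
      · have hcnt : cnt = 2 := by omega
        subst hcnt
        have hck : checkLoop2 ('8' :: t) 2 = false := by simp [checkLoop2]
        have hfalse : decide ((2 : Int).toNat + ('8' :: r').length < 3) = false := by
          simp only [List.length_cons, decide_eq_false_iff_not]
          omega
        rw [hck, hfalse, Bool.false_and]
      · have hstep : checkLoop2 ('8' :: t) cnt = checkLoop2 t (cnt + 1) := by
          simp [checkLoop2, h3]
        rw [hstep, ih (cnt + 1) r' rs' (fun x hx => hall x (List.mem_cons_of_mem _ hx))
          (by omega) (by omega) hsp']
        have heq : decide ((cnt + 1).toNat + r'.length < 3)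
            = decide (cnt.toNat + ('8' :: r').length < 3) := by
          apply decide_eq_decide.mpr
          simp only [List.length_cons]
          omega
        rw [heq]

-- ===== VERDICT (by name: the statement is the Claim_ definition above) =====
theorem check_spec : Claim_equal_check := by
  intro s _
  unfold Spec_check check check_alt
  rw [← checkLoop1_eq_all]
  cases h1 : checkLoop1 s.toList with
  | false => simp
  | true =>
    have hall : ∀ c ∈ s.toList, c = '6' ∨ c = '8' := by
      intro c hc
      rw [checkLoop1_eq_all] at h1
      have h := (List.all_eq_true.mp h1) c hc
      rw [toList_68, isIn_single_68] at h
      simpa using h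
    simp only [Bool.true_and, if_true]
    have hsplit : PySem.Str.split? s "6" = some ((sp s.toList).map String.ofList) := by
      have h6 : "6".toList = ['6'] := by decide
      simp [PySem.Str.split?, PySem.Chars.split?, h6, splitOn_eq_sp, List.isEmpty]
    rw [hsplit]
    simp only [Option.getD_some, List.all_map]
    have hlen : ((fun run => decide (PySem.Str.len run < 3)) ∘ String.ofList)
        = fun x : List Char => decide (x.length < 3) := by
      funext x
      simp [PySem.Str.len]
    rw [hlen]
    obtain ⟨r, rs, hsp⟩ : ∃ r rs, sp s.toList = r :: rs := by
      cases hh : sp s.toList with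
      | nil => exact absurd hh (sp_ne_nil s.toList)
      | cons x y => exact ⟨x, y, rfl⟩
    rw [checkLoop2_sp s.toList 0 r rs hall le_rfl (by norm_num) hsp, hsp]
    simp
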